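-- pv_equiv track=rewrite | github.com/Givikap/leetcode | easy/3842_toggle_light_bulbs/solution.py | toggleLightBulbs
-- ===== SOURCE A (Python) =====
-- from typing import List
--
-- def toggleLightBulbs(bulbs: List[int]) -> List[int]:
--     on = set()
--
--     for bulb in bulbs:
--         if bulb in on:
--             on.remove(bulb)
--         else:
--             on.add(bulb)
--
--     return sorted(on)
-- ===== SOURCE B (Python) =====
-- from typing import List
--
-- def toggleLightBulbs(bulbs: List[int]) -> List[int]:
--     s = sorted(bulbs)
--     res = []
--     n = len(s)
--     i = 0
--     while i < n:
--         j = i + 1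
--         while j < n and s[j] == s[i]:
--             j += 1
--         if (j - i) % 2 == 1:
--             res.append(s[i])
--         i = j
--     return res
-- ===== Notes on version B (the rewrite author's own statement) =====
-- stated objective: alternative
-- what changed: B replaces A's toggle-a-set pass followed by a final sort with sort-first then a single run-length scan that emits each value whose run length is odd, so no set is maintained and the output needs no further sort.
import Mathlib
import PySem

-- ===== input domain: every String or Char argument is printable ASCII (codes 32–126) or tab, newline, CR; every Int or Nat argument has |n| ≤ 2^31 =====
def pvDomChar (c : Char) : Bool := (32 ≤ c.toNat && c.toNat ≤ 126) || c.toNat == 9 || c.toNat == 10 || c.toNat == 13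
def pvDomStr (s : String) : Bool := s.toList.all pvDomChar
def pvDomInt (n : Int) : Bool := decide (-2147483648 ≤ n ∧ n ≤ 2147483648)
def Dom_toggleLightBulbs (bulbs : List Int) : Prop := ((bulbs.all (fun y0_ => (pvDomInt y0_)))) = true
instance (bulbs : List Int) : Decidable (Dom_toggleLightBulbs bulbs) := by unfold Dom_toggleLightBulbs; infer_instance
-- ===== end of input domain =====

-- B sorts first and run-length-scans the sorted list, emitting values with odd run length,
-- instead of A's toggle-membership set pass followed by a final sort (alternative decomposition, same cost).


-- ===== PORT A =====
-- the loop body: toggle membership of bulb in the set 'on' (remove is called only on members, so it is discard there)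
def toggleStep (on : PySem.Set Int) (bulb : Int) : PySem.Set Int :=
  if PySem.Set.contains on bulb then PySem.Set.discard on bulb else PySem.Set.add on bulb

def toggleLightBulbs (bulbs : List Int) : List Int :=
  PySem.List.sorted (bulbs.foldl toggleStep PySem.Set.empty) (fun x => x) false

-- ===== PORT B =====
-- run-length scan of a (sorted) list: emit the value of each run whose length is odd
def rleOdd : List Int → List Int
  | [] => []
  | x :: xs =>
    let run := xs.takeWhile (fun y => y == x)
    let rest := xs.dropWhile (fun y => y == x)
    if (run.length + 1) % 2 = 1 then x :: rleOdd rest else rleOdd rest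
termination_by l => l.length
decreasing_by
  all_goals
    simp only [List.length_cons]
    exact Nat.lt_succ_of_le (List.length_dropWhile_le _ _)

def toggleLightBulbs_alt (bulbs : List Int) : List Int :=
  rleOdd (PySem.List.sorted bulbs (fun x => x) false)

-- ===== PRECONDITION & SPEC =====
def Spec_toggleLightBulbs (bulbs : List Int) (out : List Int) : Prop := out = toggleLightBulbs_alt bulbs
instance (bulbs : List Int) (out : List Int) : Decidable (Spec_toggleLightBulbs bulbs out) := by unfold Spec_toggleLightBulbs; infer_instance

-- ===== CLAIM (what is proved, stated in full; the proofs are below) =====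
def Claim_equal_toggleLightBulbs : Prop := ∀ (bulbs : List Int), Dom_toggleLightBulbs bulbs → Spec_toggleLightBulbs bulbs (toggleLightBulbs bulbs)

-- ===== LEMMAS AND PROOFS =====

-- membership in A's toggle fold: an element is in the final set iff its count flips its initial membership
theorem mem_foldl_toggleStep (l : List Int) : ∀ (s : PySem.Set Int) (x : Int),
    x ∈ l.foldl toggleStep s ↔ ((x ∈ s ∧ l.count x % 2 = 0) ∨ (x ∉ s ∧ l.count x % 2 = 1)) := by
  induction l with
  | nil => intro s x; simp
  | cons b t ih =>
    intro s x
    rw [List.foldl_cons, ih]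
    by_cases hbx : x = b
    · subst hbx
      rw [List.count_cons_self]
      by_cases hm : x ∈ s
      · have hstep : toggleStep s x = PySem.Set.discard s x := by
          unfold toggleStep
          rw [if_pos ((PySem.Set.contains_iff s x).mpr hm)]
        rw [hstep, PySem.Set.mem_discard]
        simp [hm]
        omega
      · have hstep : toggleStep s x = PySem.Set.add s x := by
          unfold toggleStep
          rw [if_neg (by simpa [PySem.Set.contains_iff] using hm)]
        rw [hstep, PySem.Set.mem_add]
        simp [hm]
        omega
    · rw [List.count_cons_of_ne (fun h => hbx h.symm)]
      have hmem : x ∈ toggleStep s b ↔ x ∈ s := by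
        unfold toggleStep
        split
        · rw [PySem.Set.mem_discard]; simp [hbx]
        · rw [PySem.Set.mem_add]; simp [hbx]
      rw [hmem]

theorem nodup_foldl_toggleStep (l : List Int) : ∀ (s : PySem.Set Int), s.Nodup → (l.foldl toggleStep s).Nodup := by
  induction l with
  | nil => intro s hs; simpa using hs
  | cons b t ih =>
    intro s hs
    rw [List.foldl_cons]
    apply ih
    unfold toggleStep
    split
    · exact PySem.Set.nodup_discard s b hs
    · exact PySem.Set.nodup_add s b hs

-- x does not reappear after its run is dropped from a sorted tail
theorem not_mem_dropWhile_of_sorted (x : Int) (xs : List Int) (h : xs.Pairwise (· ≤ ·))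
    (hall : ∀ y ∈ xs, x ≤ y) : x ∉ xs.dropWhile (fun y => y == x) := by
  induction xs with
  | nil => simp
  | cons y ys ih =>
    by_cases hyx : y = x
    · rw [List.dropWhile_cons_of_pos (by simp [hyx])]
      exact ih (List.Pairwise.of_cons h) (fun z hz => hall z (List.mem_cons_of_mem _ hz))
    · rw [List.dropWhile_cons_of_neg (by simp [hyx])]
      intro hmem
      rcases List.mem_cons.mp hmem with h1 | h2
      · exact hyx h1.symm
      · have hyle : y ≤ x := (List.pairwise_cons.mp h).1 x h2
        have hxle : x ≤ y := hall y (List.mem_cons_self)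
        exact hyx (le_antisymm hyle hxle)

-- run-length characterisation of rleOdd on a sorted list, by induction on a length bound
theorem rleOdd_spec_aux : ∀ (n : Nat) (s : List Int), s.length ≤ n → s.Pairwise (· ≤ ·) →
    (rleOdd s).Pairwise (· < ·) ∧ ∀ x, x ∈ rleOdd s ↔ x ∈ s ∧ s.count x % 2 = 1 := by
  intro n
  induction n with
  | zero =>
    intro s hlen _
    have hnil : s = [] := List.length_eq_zero_iff.mp (Nat.le_zero.mp hlen)
    subst hnil
    simp [rleOdd]
  | succ n ih =>
    intro s hlen hs
    match s with
    | [] => simp [rleOdd]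
    | x :: xs =>
      have hre : rleOdd (x :: xs) =
          if ((xs.takeWhile (fun y => y == x)).length + 1) % 2 = 1
          then x :: rleOdd (xs.dropWhile (fun y => y == x))
          else rleOdd (xs.dropWhile (fun y => y == x)) := by
        rw [rleOdd]
      have hxs : xs.Pairwise (· ≤ ·) := List.Pairwise.of_cons hs
      have hallxs : ∀ y ∈ xs, x ≤ y := (List.pairwise_cons.mp hs).1
      have hxd : x ∉ xs.dropWhile (fun y => y == x) :=
        not_mem_dropWhile_of_sorted x xs hxs hallxs
      have hsubd : (xs.dropWhile (fun y => y == x)).Sublist xs := List.dropWhile_sublist _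
      have hd : (xs.dropWhile (fun y => y == x)).Pairwise (· ≤ ·) := hxs.sublist hsubd
      have hlend : (xs.dropWhile (fun y => y == x)).length ≤ n := by
        have h1 := List.length_dropWhile_le (fun y => y == x) xs
        have h2 : xs.length ≤ n := by simpa using Nat.le_of_succ_le_succ (by simpa using hlen)
        omega
      obtain ⟨ihp, ihm⟩ := ih (xs.dropWhile (fun y => y == x)) hlend hd
      have hruneq : ∀ y ∈ xs.takeWhile (fun y => y == x), y = x := by
        intro y hy
        simpa using List.mem_takeWhile_imp hy
      have hsplit : xs.takeWhile (fun y => y == x) ++ xs.dropWhile (fun y => y == x) = xs :=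
        List.takeWhile_append_dropWhile
      -- count of x in x :: xs is the run length + 1
      have hcx : (x :: xs).count x = (xs.takeWhile (fun y => y == x)).length + 1 := by
        have h1 : (xs.takeWhile (fun y => y == x)).count x = (xs.takeWhile (fun y => y == x)).length :=
          List.count_eq_length.mpr (fun b hb => (hruneq b hb).symm)
        have h2 : (xs.dropWhile (fun y => y == x)).count x = 0 := List.count_eq_zero.mpr hxd
        have h3 := congrArg (List.count x) hsplit
        rw [List.count_append] at h3
        rw [List.count_cons_self, ← h3, h1, h2]
      -- count of y ≠ x survives into the dropped rest
      have hcy : ∀ y, y ≠ x → (x :: xs).count y = (xs.dropWhile (fun z => z == x)).count y := by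
        intro y hy
        have h1 : (xs.takeWhile (fun z => z == x)).count y = 0 :=
          List.count_eq_zero.mpr (fun hmem => hy (hruneq y hmem))
        have h3 := congrArg (List.count y) hsplit
        rw [List.count_append, h1, Nat.zero_add] at h3
        rw [List.count_cons_of_ne (fun h => hy h.symm), ← h3]
      have hmemd : ∀ y, y ≠ x → (y ∈ xs.dropWhile (fun z => z == x) ↔ y ∈ x :: xs) := by
        intro y hy
        constructor
        · intro h; exact List.mem_cons_of_mem _ (hsubd.mem h)
        · intro h
          rcases List.mem_cons.mp h with h1 | h2
          · exact absurd h1 hy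
          · rw [← hsplit] at h2
            rcases List.mem_append.mp h2 with h3 | h4
            · exact absurd (hruneq y h3) hy
            · exact h4
      have hlt : ∀ y ∈ xs.dropWhile (fun z => z == x), x < y := by
        intro y hy
        have h1 : x ≤ y := hallxs y (hsubd.mem hy)
        have h2 : y ≠ x := fun h => hxd (h ▸ hy)
        exact lt_of_le_of_ne h1 (Ne.symm h2)
      by_cases hpar : ((xs.takeWhile (fun y => y == x)).length + 1) % 2 = 1
      · rw [hre, if_pos hpar]
        constructor
        · exact List.pairwise_cons.mpr ⟨fun y hy => hlt y ((ihm y).mp hy |>.1), ihp⟩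
        · intro y
          rw [List.mem_cons, ihm y]
          by_cases hy : y = x
          · subst hy
            simp only [true_or, true_iff]
            exact ⟨List.mem_cons_self, by rw [hcx]; exact hpar⟩
          · simp only [hy, false_or]
            rw [hmemd y hy, hcy y hy]
      · rw [hre, if_neg hpar]
        refine ⟨ihp, fun y => ?_⟩
        rw [ihm y]
        by_cases hy : y = x
        · subst hy
          simp only [hxd, false_and, false_iff, not_and]
          intro _
          rw [hcx]; exact hpar
        · rw [hmemd y hy, hcy y hy]

theorem rleOdd_spec (s : List Int) (hs : s.Pairwise (· ≤ ·)) :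
    (rleOdd s).Pairwise (· < ·) ∧ ∀ x, x ∈ rleOdd s ↔ x ∈ s ∧ s.count x % 2 = 1 :=
  rleOdd_spec_aux s.length s le_rfl hs

-- ===== VERDICT (by name: the statement is the Claim_ definition above) =====
theorem toggleLightBulbs_spec : Claim_equal_toggleLightBulbs := by
  intro bulbs _
  unfold Spec_toggleLightBulbs toggleLightBulbs toggleLightBulbs_alt
  set sb := PySem.List.sorted bulbs (fun x => x) false with hsb
  have hpsb : sb.Pairwise (· ≤ ·) := by
    have := PySem.List.sorted_pairwise bulbs (fun x => x)
    simpa using this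
  obtain ⟨hp, hm⟩ := rleOdd_spec sb hpsb
  have hcnt : ∀ x : Int, sb.count x = bulbs.count x :=
    fun x => (PySem.List.sorted_perm bulbs (fun x => x) false).count_eq x
  -- the final set of A and rleOdd sb have the same members, both without duplicates
  have hperm : (rleOdd sb).Perm (bulbs.foldl toggleStep PySem.Set.empty) := by
    rw [List.perm_ext_iff_of_nodup (hp.imp (fun h => ne_of_lt h))
      (nodup_foldl_toggleStep bulbs PySem.Set.empty List.nodup_nil)]
    intro x
    rw [hm x, mem_foldl_toggleStep]
    have hempty : x ∉ PySem.Set.empty := by simp [PySem.Set.empty]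
    simp only [hempty, false_and, false_or, true_and, not_false_iff]
    constructor
    · rintro ⟨_, hodd⟩; rw [← hcnt]; exact hodd
    · intro hodd
      have hpos : 0 < bulbs.count x := by omega
      have hmem : x ∈ bulbs := List.count_pos_iff.mp hpos
      exact ⟨(PySem.List.sorted_perm bulbs (fun x => x) false).mem_iff.mpr hmem, by rw [hcnt]; exact hodd⟩
  exact PySem.List.sorted_eq_of_perm_of_pairwise_lt _ _ (fun x => x) hperm hp
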